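-- pv_equiv track=rewrite | github.com/russia423690/ddos_protect | middleware/anomaly_detection.py | is_sequential_pattern
-- ===== SOURCE A (Python) =====
-- from typing import Dict, Any, List, Optional
--
-- def is_sequential_pattern(paths: List[str]) -> bool:
--     numeric_sequences = []
--
--     for path in paths:
--         components = path.split('/')
--         for component in components:
--             if component.isdigit():
--                 numeric_sequences.append(int(component))
--
--     if len(numeric_sequences) >= 3:
--         differences = [numeric_sequences[i+1] - numeric_sequences[i]
--                       for i in range(len(numeric_sequences)-1)]
--
--         if len(set(differences)) == 1:
--             return True
--
--         if all(differences[i] == 1 for i in range(len(differences))):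
--             return True
--
--     return False
-- ===== SOURCE B (Python) =====
-- def is_sequential_pattern(paths):
--     count = 0
--     prev = 0
--     step = 0
--     ok = True
--     for path in paths:
--         for component in path.split('/'):
--             if component.isdigit():
--                 v = int(component)
--                 if count == 0:
--                     pass
--                 elif count == 1:
--                     step = v - prev
--                 else:
--                     ok = ok and (v - prev == step)
--                 prev = v
--                 count += 1
--     return count >= 3 and ok
-- ===== Notes on version B (the rewrite author's own statement) =====
-- stated objective: alternative
-- what changed: B replaces A's staged passes (build a numbers list, build a differences list by index, deduplicate it into a set, plus a redundant all(==1) re-scan) by a single streaming pass over path components that maintains only scalar state (count, previous number, expected step, ok flag) and materializes no intermediate lists.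
import Mathlib
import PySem

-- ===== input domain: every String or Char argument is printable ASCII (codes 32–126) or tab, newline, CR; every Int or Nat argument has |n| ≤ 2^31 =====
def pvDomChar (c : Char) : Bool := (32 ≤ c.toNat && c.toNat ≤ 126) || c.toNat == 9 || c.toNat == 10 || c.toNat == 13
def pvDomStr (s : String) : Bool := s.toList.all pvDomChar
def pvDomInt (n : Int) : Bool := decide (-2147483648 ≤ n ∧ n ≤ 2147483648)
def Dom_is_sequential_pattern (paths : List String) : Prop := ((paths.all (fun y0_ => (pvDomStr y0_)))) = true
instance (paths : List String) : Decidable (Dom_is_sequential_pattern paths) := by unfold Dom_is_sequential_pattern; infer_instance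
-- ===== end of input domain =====

-- B is a single streaming pass with O(1) scalar state (count, prev, step, ok) over the path
-- components, instead of A's staged passes that materialize a numbers list, a differences
-- list and a set (objective: alternative; same asymptotic cost).

-- ===== PORT A =====
-- 'int(component)' is guarded by 'component.isdigit()', under which PySem.Int.ofStr?
-- returns 'some' on the ASCII domain, so '.getD 0' is never the default; likewise every
-- index taken below is in range, so pyGetD never falls back to its default.
def is_sequential_pattern (paths : List String) : Bool :=
  let numeric_sequences : List Int := paths.foldl (fun acc path =>
    let components := (PySem.Str.split? path "/").getD []
    components.foldl (fun acc c =>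
      if PySem.Str.strIsdigit c then acc ++ [(PySem.Int.ofStr? c).getD 0] else acc) acc) []
  if numeric_sequences.length ≥ 3 then
    let differences : List Int := (List.range (numeric_sequences.length - 1)).map
      (fun i : Nat => PySem.List.pyGetD numeric_sequences ((i : Int) + 1) 0
                    - PySem.List.pyGetD numeric_sequences ((i : Int)) 0)
    if (PySem.Set.ofList differences).length = 1 then true
    else if (List.range differences.length).all
        (fun i : Nat => PySem.List.pyGetD differences ((i : Int)) 0 == 1) then true
    else false
  else false

-- ===== PORT B =====
-- the state is (count, prev, step, ok); one update per numeric component, as in Source B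
def bStep (st : Int × Int × Int × Bool) (v : Int) : Int × Int × Int × Bool :=
  let (count, prev, step, ok) := st
  if count == 0 then (count + 1, v, step, ok)
  else if count == 1 then (count + 1, v, v - prev, ok)
  else (count + 1, v, step, ok && (v - prev == step))

def is_sequential_pattern_alt (paths : List String) : Bool :=
  let st := paths.foldl (fun st path =>
    ((PySem.Str.split? path "/").getD []).foldl (fun st c =>
      if PySem.Str.strIsdigit c then bStep st ((PySem.Int.ofStr? c).getD 0) else st) st)
    (0, 0, 0, true)
  decide (3 ≤ st.1) && st.2.2.2

-- ===== PRECONDITION & SPEC =====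
def Spec_is_sequential_pattern (paths : List String) (out : Bool) : Prop := out = is_sequential_pattern_alt paths
instance (paths : List String) (out : Bool) : Decidable (Spec_is_sequential_pattern paths out) := by unfold Spec_is_sequential_pattern; infer_instance

-- ===== CLAIM (what is proved, stated in full; the proofs are below) =====
def Claim_equal_is_sequential_pattern : Prop := ∀ (paths : List String), Dom_is_sequential_pattern paths → Spec_is_sequential_pattern paths (is_sequential_pattern paths)

-- ===== LEMMAS AND PROOFS =====

def numOf (c : String) : Int := (PySem.Int.ofStr? c).getD 0

def digitsOf (p : String) : List Int :=
  (((PySem.Str.split? p "/").getD []).filter PySem.Str.strIsdigit).map numOf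

-- the inner collect loop of A is an append of a filter+map
theorem inner_foldl_eq (cs : List String) (acc : List Int) :
    cs.foldl (fun acc c =>
      if PySem.Str.strIsdigit c then acc ++ [(PySem.Int.ofStr? c).getD 0] else acc) acc
    = acc ++ (cs.filter PySem.Str.strIsdigit).map (fun c => (PySem.Int.ofStr? c).getD 0) := by
  induction cs generalizing acc with
  | nil => simp
  | cons c cs ih =>
    simp only [List.foldl_cons, List.filter_cons]
    by_cases h : PySem.Str.strIsdigit c = true
    · rw [if_pos h, if_pos h, ih]; simp
    · rw [if_neg h, if_neg h, ih]

-- A collects exactly the flattened digit numbers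
theorem nums_eq (paths : List String) :
    paths.foldl (fun acc path =>
      ((PySem.Str.split? path "/").getD []).foldl (fun acc c =>
        if PySem.Str.strIsdigit c then acc ++ [(PySem.Int.ofStr? c).getD 0] else acc) acc) []
    = paths.flatMap digitsOf := by
  have e : (fun (acc : List Int) (path : String) =>
      ((PySem.Str.split? path "/").getD []).foldl (fun acc c =>
        if PySem.Str.strIsdigit c then acc ++ [(PySem.Int.ofStr? c).getD 0] else acc) acc)
    = (fun (acc : List Int) (path : String) => acc ++ digitsOf path) :=
    funext fun acc => funext fun path => inner_foldl_eq _ acc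
  rw [e, PySem.List.foldl_append_eq_flatMap]
  simp

-- B's inner loop is a fold of bStep over the same digit numbers of one path
theorem inner_stream_eq (cs : List String) (st : Int × Int × Int × Bool) :
    cs.foldl (fun st c =>
      if PySem.Str.strIsdigit c then bStep st ((PySem.Int.ofStr? c).getD 0) else st) st
    = ((cs.filter PySem.Str.strIsdigit).map numOf).foldl bStep st := by
  induction cs generalizing st with
  | nil => rfl
  | cons c cs ih =>
    simp only [List.foldl_cons, List.filter_cons]
    by_cases h : PySem.Str.strIsdigit c = true
    · rw [if_pos h, if_pos h, ih]; rfl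
    · rw [if_neg h, if_neg h, ih]

-- B's nested loops are one fold of bStep over the flattened digit numbers
theorem stream_flat (paths : List String) (st : Int × Int × Int × Bool) :
    paths.foldl (fun st path =>
      ((PySem.Str.split? path "/").getD []).foldl (fun st c =>
        if PySem.Str.strIsdigit c then bStep st ((PySem.Int.ofStr? c).getD 0) else st) st) st
    = (paths.flatMap digitsOf).foldl bStep st := by
  induction paths generalizing st with
  | nil => rfl
  | cons p ps ih =>
    simp only [List.foldl_cons, List.flatMap_cons, List.foldl_append]
    rw [inner_stream_eq, ih]
    rfl

-- boolean chain: every element extends the arithmetic progression with step s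
def chain (s : Int) (prev : Int) : List Int → Bool
  | [] => true
  | x :: xs => (x - prev == s) && chain s x xs

-- the stream state after the first two numbers, characterized
theorem stream_tail (t : List Int) (c prev s : Int) (ok : Bool) (hc : 2 ≤ c) :
    t.foldl bStep (c, prev, s, ok)
    = (c + (t.length : Int), t.getLastD prev, s, ok && chain s prev t) := by
  induction t generalizing c prev ok with
  | nil => simp [chain]
  | cons x xs ih =>
    have h0 : (c == 0) = false := by simp; omega
    have h1 : (c == 1) = false := by simp; omega
    simp only [List.foldl_cons, bStep, h0, h1, Bool.false_eq_true, if_false]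
    rw [ih (c + 1) x (ok && (x - prev == s)) (by omega)]
    simp only [chain, List.getLastD_cons, List.length_cons, Prod.mk.injEq]
    refine ⟨by push_cast; ring, trivial, trivial, by simp [Bool.and_assoc]⟩

-- chain equals the zip-of-consecutive-pairs check
theorem chain_eq_zip (s : Int) (prev : Int) (t : List Int) :
    chain s prev t = ((prev :: t).zip t).all (fun xy => xy.2 - xy.1 == s) := by
  induction t generalizing prev with
  | nil => rfl
  | cons x xs ih => simp [chain, ih x]

-- B's decision on the flattened numbers, in zip form
theorem stream_eq (ns : List Int) :
    (decide (3 ≤ (ns.foldl bStep (0, 0, 0, true)).1) && (ns.foldl bStep (0, 0, 0, true)).2.2.2)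
    = (if ns.length < 3 then false
       else (ns.zip (ns.drop 1)).all
         (fun xy => xy.2 - xy.1 == PySem.List.pyGetD ns 1 0 - PySem.List.pyGetD ns 0 0)) := by
  match ns with
  | [] => simp
  | [a] => simp [bStep]
  | a :: b :: t =>
    have h2 : (a :: b :: t).foldl bStep (0, 0, 0, true)
        = (2 + (t.length : Int), t.getLastD b, b - a, chain (b - a) b t) := by
      show t.foldl bStep (bStep (bStep (0,0,0,true) a) b) = _
      rw [show bStep (bStep (0,0,0,true) a) b = (2, b, b - a, true) from by simp [bStep]]
      simpa using stream_tail t 2 b (b - a) true (by omega)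
    rw [h2]
    match t with
    | [] => simp
    | c :: r =>
      have hlen : ¬ ((a :: b :: c :: r).length < 3) := by simp
      rw [if_neg hlen]
      have hge : (3 : Int) ≤ 2 + ((c :: r).length : Int) := by
        have : 1 ≤ (c :: r).length := by simp
        omega
      rw [show (PySem.List.pyGetD (a :: b :: c :: r) 1 0) = b from by
            rw [show (1 : Int) = ((1 : Nat) : Int) from rfl, PySem.List.pyGetD_natCast]; rfl,
          PySem.List.pyGetD_zero_cons]
      simp only [decide_eq_true hge, Bool.true_and]
      rw [chain_eq_zip]
      show ((b :: c :: r).zip (c :: r)).all (fun xy => xy.2 - xy.1 == b - a)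
        = ((a :: b :: c :: r).zip (b :: c :: r)).all (fun xy => xy.2 - xy.1 == b - a)
      simp [List.zip_cons_cons]

-- A's index comprehension of differences equals the zip of consecutive pairs
theorem diffs_eq (ns : List Int) :
    (List.range (ns.length - 1)).map
      (fun i : Nat => PySem.List.pyGetD ns ((i : Int) + 1) 0 - PySem.List.pyGetD ns ((i : Int)) 0)
    = (ns.zip (ns.drop 1)).map (fun xy => xy.2 - xy.1) := by
  apply List.ext_getElem
  · simp [List.length_zip]
  · intro i h1 h2
    simp only [List.getElem_map, List.getElem_range, List.getElem_zip]
    have hi : i < ns.length - 1 := by simpa using h1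
    have h1' : i + 1 < ns.length := by omega
    have h0' : i < ns.length := by omega
    rw [show ((i : Int) + 1) = (((i + 1 : Nat)) : Int) by push_cast; ring,
        PySem.List.pyGetD_natCast, PySem.List.pyGetD_natCast]
    simp [List.getD_eq_getElem?_getD, h1', h0']

-- a fold of Set.add over elements already present leaves the set unchanged
theorem foldl_add_of_mem (t : List Int) (s : List Int) (h : ∀ x ∈ t, x ∈ s) :
    t.foldl PySem.Set.add s = s := by
  induction t generalizing s with
  | nil => rfl
  | cons x ts ih =>
    simp only [List.foldl_cons]
    rw [PySem.Set.add_of_mem (h x (by simp))]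
    exact ih s (fun y hy => h y (by simp [hy]))

-- the set of a nonempty list has one element iff everything equals the head
theorem set_len_one_iff (a : Int) (t : List Int) :
    (PySem.Set.ofList (a :: t)).length = 1 ↔ ∀ x ∈ t, x = a := by
  constructor
  · intro h x hx
    obtain ⟨y, hy⟩ := List.length_eq_one_iff.mp h
    have ha : a ∈ PySem.Set.ofList (a :: t) := (PySem.Set.mem_ofList _ _).mpr (by simp)
    have hxm : x ∈ PySem.Set.ofList (a :: t) := (PySem.Set.mem_ofList _ _).mpr (by simp [hx])
    rw [hy] at ha hxm
    simp at ha hxm; omega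
  · intro h
    have e : PySem.Set.ofList (a :: t) = [a] := by
      rw [PySem.Set.ofList_eq_foldl]
      simp only [List.foldl_cons]
      rw [show PySem.Set.add [] a = [a] from rfl]
      exact foldl_add_of_mem t [a] (fun x hx => by simp [h x hx])
    simp [e]

-- A's second branch: if every difference indexes to 1, every element of the list is 1
theorem all_ones (d : List Int)
    (h : (List.range d.length).all (fun i : Nat => PySem.List.pyGetD d ((i : Int)) 0 == 1) = true) :
    ∀ x ∈ d, x = 1 := by
  intro x hx
  obtain ⟨i, hi, rfl⟩ := List.mem_iff_getElem.mp hx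
  have h2 := List.all_eq_true.mp h i (List.mem_range.mpr hi)
  rw [PySem.List.pyGetD_natCast] at h2
  simpa [List.getD_eq_getElem?_getD, List.getElem?_eq_getElem, hi] using h2

-- A's decision on a fixed list of collected numbers, in the same zip form
theorem main_eq (ns : List Int) :
    (if ns.length ≥ 3 then
      (let differences : List Int := (List.range (ns.length - 1)).map
        (fun i : Nat => PySem.List.pyGetD ns ((i : Int) + 1) 0 - PySem.List.pyGetD ns ((i : Int)) 0)
       if (PySem.Set.ofList differences).length = 1 then true
       else if (List.range differences.length).all
           (fun i : Nat => PySem.List.pyGetD differences ((i : Int)) 0 == 1) then true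
       else false)
     else false)
    = (if ns.length < 3 then false
       else (ns.zip (ns.drop 1)).all
         (fun xy => xy.2 - xy.1 == PySem.List.pyGetD ns 1 0 - PySem.List.pyGetD ns 0 0)) := by
  match ns with
  | [] => simp
  | [a] => simp
  | [a, b] => simp
  | a :: b :: c :: r =>
    have hge : (a :: b :: c :: r).length ≥ 3 := by simp
    have hlt : ¬ ((a :: b :: c :: r).length < 3) := by simp
    rw [if_pos hge, if_neg hlt]
    show (if (PySem.Set.ofList _).length = 1 then true else _) = _
    rw [diffs_eq]
    rw [show PySem.List.pyGetD (a :: b :: c :: r) 1 0 = b from by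
          rw [show (1 : Int) = ((1 : Nat) : Int) from rfl, PySem.List.pyGetD_natCast]; rfl,
        PySem.List.pyGetD_zero_cons]
    rw [show ((a :: b :: c :: r).zip ((a :: b :: c :: r).drop 1)).map (fun xy => xy.2 - xy.1)
          = (b - a) :: (((b :: c :: r).zip (c :: r)).map (fun xy => xy.2 - xy.1)) from rfl]
    have hz : ((a :: b :: c :: r).zip ((a :: b :: c :: r).drop 1)).all
          (fun xy => xy.2 - xy.1 == b - a)
        = ((b - a) :: (((b :: c :: r).zip (c :: r)).map (fun xy => xy.2 - xy.1))).all
          (fun x => x == b - a) := by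
      simp [List.all_map, Function.comp_def]
    rw [hz]
    set d' : List Int := ((b :: c :: r).zip (c :: r)).map (fun xy => xy.2 - xy.1) with hd'
    by_cases hall : ∀ x ∈ d', x = b - a
    · rw [if_pos ((set_len_one_iff (b - a) d').mpr hall)]
      symm
      simp only [List.all_eq_true]
      intro x hx
      rcases List.mem_cons.mp hx with h' | h'
      · simp [h']
      · simp [hall x h']
    · rw [if_neg (fun hc => hall ((set_len_one_iff (b - a) d').mp hc))]
      have hA : ¬ ((List.range ((b - a) :: d').length).all
          (fun i : Nat => PySem.List.pyGetD ((b - a) :: d') ((i : Int)) 0 == 1) = true) := by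
        intro hc
        have h2 := all_ones _ hc
        exact hall (fun x hx => by
          rw [h2 x (List.mem_cons_of_mem _ hx)]
          exact (h2 (b - a) (List.mem_cons_self)).symm)
      rw [if_neg hA]
      symm
      rw [List.all_eq_false]
      push Not at hall
      obtain ⟨x, hx, hne⟩ := hall
      exact ⟨x, List.mem_cons_of_mem _ hx, by simpa using hne⟩

-- ===== VERDICT (by name: the statement is the Claim_ definition above) =====
theorem is_sequential_pattern_spec : Claim_equal_is_sequential_pattern := by
  intro paths _
  unfold Spec_is_sequential_pattern
  simp only [is_sequential_pattern, is_sequential_pattern_alt, nums_eq, stream_flat]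
  rw [stream_eq]
  exact main_eq _
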